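-- pv_equiv track=rewrite | github.com/valgardg/leetcode | p2.py | prefixConnected
-- ===== SOURCE A (Python) =====
-- def prefixConnected(words, k):
--     """
--     :type words: List[str]
--     :type k: int
--     :rtype: int
--     """
--
--     prefixes = dict()
--     for word in words:
--         if len(word) < k:
--             continue
--         if word[:k] not in prefixes:
--             prefixes[word[:k]] = 1
--         else:
--             prefixes[word[:k]] += 1
--
--     return len([x for x in prefixes.values() if x > 1])
-- ===== SOURCE B (Python) =====
-- def prefixConnected(words, k):
--     """
--     :type words: List[str]
--     :type k: int
--     :rtype: int
--     """
--     prefixes = sorted(word[:k] for word in words if len(word) >= k)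
--     ans = 0
--     cur = None
--     run = 0
--     for p in prefixes:
--         if p == cur:
--             run += 1
--         else:
--             if run > 1:
--                 ans += 1
--             cur = p
--             run = 1
--     if run > 1:
--         ans += 1
--     return ans
-- ===== Notes on version B (the rewrite author's own statement) =====
-- stated objective: alternative
-- what changed: Replaces the hash-map frequency dict with sort-then-scan: collect the k-prefixes, sort them, and count in one pass the runs of adjacent equal prefixes whose length exceeds 1.
import Mathlib
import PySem

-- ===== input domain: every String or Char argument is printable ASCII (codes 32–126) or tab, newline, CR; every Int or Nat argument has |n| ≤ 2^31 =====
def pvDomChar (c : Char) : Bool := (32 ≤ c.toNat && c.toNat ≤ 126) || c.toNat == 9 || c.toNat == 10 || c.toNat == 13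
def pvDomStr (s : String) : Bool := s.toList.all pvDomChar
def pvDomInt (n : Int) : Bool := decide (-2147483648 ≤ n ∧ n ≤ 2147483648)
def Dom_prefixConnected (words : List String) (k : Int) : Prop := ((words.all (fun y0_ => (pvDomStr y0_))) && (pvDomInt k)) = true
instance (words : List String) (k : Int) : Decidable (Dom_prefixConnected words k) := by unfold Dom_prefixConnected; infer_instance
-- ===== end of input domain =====

-- B replaces A's frequency dict by sorting the k-prefixes and counting runs of adjacent duplicates in one pass (alternative decomposition, no speed claim).

-- ===== PORT A =====
def prefixConnected (words : List String) (k : Int) : Int :=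
  let prefixes := words.foldl (fun d w =>
    if PySem.Str.len w < k then d
    else
      let p := PySem.Str.slice w none (some k)
      if (PySem.Dict.contains d p) = false then PySem.Dict.insert d p 1
      else PySem.Dict.insert d p (PySem.Dict.getD d p 0 + 1)) (PySem.Dict.empty : PySem.Dict String Int)
  (((PySem.Dict.values prefixes).filter (fun x => 1 < x)).length : Int)

-- ===== PORT B =====
def pvBStep (st : Int × Option String × Int) (p : String) : Int × Option String × Int :=
  if st.2.1 = some p then (st.1, st.2.1, st.2.2 + 1)
  else ((if 1 < st.2.2 then st.1 + 1 else st.1), some p, 1)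

def prefixConnected_alt (words : List String) (k : Int) : Int :=
  let prefixes := PySem.List.sorted
    ((words.filter (fun w => k ≤ PySem.Str.len w)).map (fun w => PySem.Str.slice w none (some k)))
    (fun x => x) false
  let s := prefixes.foldl pvBStep (0, none, 0)
  if 1 < s.2.2 then s.1 + 1 else s.1

-- ===== PRECONDITION & SPEC =====
def Spec_prefixConnected (words : List String) (k : Int) (out : Int) : Prop := out = prefixConnected_alt words k
instance (words : List String) (k : Int) (out : Int) : Decidable (Spec_prefixConnected words k out) := by unfold Spec_prefixConnected; infer_instance

-- ===== CLAIM (what is proved, stated in full; the proofs are below) =====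
def Claim_equal_prefixConnected : Prop := ∀ (words : List String) (k : Int), Dom_prefixConnected words k → Spec_prefixConnected words k (prefixConnected words k)

-- ===== LEMMAS AND PROOFS =====

-- number of distinct values occurring more than once in l (the common characterisation of both ports' results)
def pvMulti (l : List String) : Int :=
  (((PySem.List.dedup l).filter (fun p => 1 < (l.count p : Int))).length : Int)

-- the list of k-prefixes both programs tally
def pvPs (words : List String) (k : Int) : List String :=
  (words.filter (fun w => k ≤ PySem.Str.len w)).map (fun w => PySem.Str.slice w none (some k))

def pvFinish (st : Int × Option String × Int) : Int :=
  if 1 < st.2.2 then st.1 + 1 else st.1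

lemma pvDiscard_not_mem (s : List String) (a : String) (h : a ∉ s) : PySem.Set.discard s a = s := by
  simp only [PySem.Set.discard]
  apply List.filter_eq_self.mpr
  intro x hx
  simp only [Bool.not_eq_eq_eq_not, Bool.not_true, beq_eq_false_iff_ne, ne_eq]
  rintro rfl; exact h hx

lemma pvDiscard_cons_self (s : List String) (a : String) :
    PySem.Set.discard (a :: s) a = PySem.Set.discard s a := by
  simp only [PySem.Set.discard, List.filter_cons]
  simp

lemma pvDedup_rep_append (a : String) (n : Nat) (m : List String) (hm : a ∉ m) :
    PySem.List.dedup (List.replicate (n + 1) a ++ m) = a :: PySem.List.dedup m := by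
  induction n with
  | zero =>
      show PySem.List.dedup (List.replicate 1 a ++ m) = _
      rw [List.replicate_one, List.singleton_append, PySem.List.dedup_eq_ofList,
        PySem.Set.ofList_cons, ← PySem.List.dedup_eq_ofList,
        pvDiscard_not_mem _ _ (by simpa [PySem.List.mem_dedup] using hm)]
  | succ n ih =>
      have h2 : List.replicate (n + 1 + 1) a ++ m = a :: (List.replicate (n + 1) a ++ m) := by
        simp [List.replicate_succ]
      rw [h2, PySem.List.dedup_eq_ofList, PySem.Set.ofList_cons, ← PySem.List.dedup_eq_ofList, ih,
        pvDiscard_cons_self, pvDiscard_not_mem _ _ (by simpa [PySem.List.mem_dedup] using hm)]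

lemma pvMulti_perm {l l' : List String} (h : l.Perm l') : pvMulti l = pvMulti l' := by
  unfold pvMulti
  rw [← List.countP_eq_length_filter, ← List.countP_eq_length_filter]
  have h1 : (PySem.List.dedup l).Perm (PySem.List.dedup l') := by
    rw [List.perm_ext_iff_of_nodup (PySem.List.nodup_dedup l) (PySem.List.nodup_dedup l')]
    intro x; simp [h.mem_iff]
  rw [h1.countP_eq, List.countP_congr]
  intro x _
  simp [h.count_eq]

lemma pvMulti_rep_append (a : String) (r : Nat) (hr : 1 ≤ r) (m : List String) (hm : a ∉ m) :
    pvMulti (List.replicate r a ++ m) = (if 1 < (r : Int) then 1 else 0) + pvMulti m := by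
  obtain ⟨n, rfl⟩ : ∃ n, r = n + 1 := ⟨r - 1, by omega⟩
  unfold pvMulti
  rw [pvDedup_rep_append a n m hm, List.filter_cons]
  have hca : (List.replicate (n + 1) a ++ m).count a = n + 1 := by
    simp [List.count_append, List.count_eq_zero_of_not_mem hm]
  have hfc : ∀ x ∈ PySem.List.dedup m,
      (decide (1 < ((List.replicate (n + 1) a ++ m).count x : Int)))
        = (decide (1 < (m.count x : Int))) := by
    intro x hx
    have hxm : x ∈ m := (PySem.List.mem_dedup m x).mp hx
    have hax : a ≠ x := fun e => hm (e ▸ hxm)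
    simp [List.count_append, List.count_replicate, hax]
  rw [List.filter_congr hfc]
  rw [hca]
  split_ifs with h1 h2 h2 <;> push_cast [List.length_cons, decide_eq_true_eq] at * <;> omega

lemma pvA_fold (k : Int) (words : List String) : ∀ d : PySem.Dict String Int,
    words.foldl (fun d w =>
      if PySem.Str.len w < k then d
      else if (PySem.Dict.contains d (PySem.Str.slice w none (some k))) = false
        then PySem.Dict.insert d (PySem.Str.slice w none (some k)) 1
        else PySem.Dict.insert d (PySem.Str.slice w none (some k))
          (PySem.Dict.getD d (PySem.Str.slice w none (some k)) 0 + 1)) d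
    = (pvPs words k).foldl (fun d x => d.insert x (d.getD x 0 + 1)) d := by
  induction words with
  | nil => intro d; rfl
  | cons w ws ih =>
      intro d
      by_cases hk : PySem.Str.len w < k
      · have hcond : (decide (k ≤ PySem.Str.len w)) = false := by
          rw [decide_eq_false_iff_not]; omega
        have hps : pvPs (w :: ws) k = pvPs ws k := by
          unfold pvPs; rw [List.filter_cons]; rw [hcond]; simp
        rw [hps, List.foldl_cons, if_pos hk, ih]
      · have hcond : (decide (k ≤ PySem.Str.len w)) = true := by
          rw [decide_eq_true_eq]; omega
        have hps : pvPs (w :: ws) k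
            = PySem.Str.slice w none (some k) :: pvPs ws k := by
          unfold pvPs; rw [List.filter_cons]; rw [hcond]; simp
        rw [hps, List.foldl_cons, List.foldl_cons, if_neg hk, ih]
        have hd : (if (PySem.Dict.contains d (PySem.Str.slice w none (some k))) = false
              then PySem.Dict.insert d (PySem.Str.slice w none (some k)) 1
              else PySem.Dict.insert d (PySem.Str.slice w none (some k))
                (PySem.Dict.getD d (PySem.Str.slice w none (some k)) 0 + 1))
            = PySem.Dict.insert d (PySem.Str.slice w none (some k))
                (PySem.Dict.getD d (PySem.Str.slice w none (some k)) 0 + 1) := by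
          by_cases hc : (PySem.Dict.contains d (PySem.Str.slice w none (some k))) = false
          · rw [if_pos hc]
            have hg : PySem.Dict.getD d (PySem.Str.slice w none (some k)) 0 = 0 := by
              rw [PySem.Dict.contains_eq_isSome_get?] at hc
              rw [PySem.Dict.getD]
              rcases h : PySem.Dict.get? d (PySem.Str.slice w none (some k)) with _ | v
              · rfl
              · rw [h] at hc; simp at hc
            rw [hg]; norm_num
          · rw [if_neg hc]
        show List.foldl (fun d x => d.insert x (d.getD x 0 + 1))
            (if (PySem.Dict.contains d (PySem.Str.slice w none (some k))) = false
              then PySem.Dict.insert d (PySem.Str.slice w none (some k)) 1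
              else PySem.Dict.insert d (PySem.Str.slice w none (some k))
                (PySem.Dict.getD d (PySem.Str.slice w none (some k)) 0 + 1)) (pvPs ws k) = _
        rw [hd]

lemma pvA_eq (words : List String) (k : Int) : prefixConnected words k = pvMulti (pvPs words k) := by
  simp only [prefixConnected]
  rw [pvA_fold k words PySem.Dict.empty, PySem.Dict.foldl_insert_getD_add_one_eq_counter]
  have hv : (PySem.Dict.counter (pvPs words k)).values
      = (PySem.Set.ofList (pvPs words k)).map (fun p => ((pvPs words k).count p : Int)) := by
    simp only [PySem.Dict.values, PySem.Dict.items_counter, List.map_map]; rfl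
  rw [hv, List.filter_map, List.length_map]
  unfold pvMulti
  simp only [PySem.List.dedup_eq_ofList]
  congr 1

lemma pvB_run (l : List String) : ∀ (a : String) (r : Nat) (ans : Int),
    1 ≤ r → l.Pairwise (· ≤ ·) → (∀ x ∈ l, a ≤ x) →
    pvFinish (l.foldl pvBStep (ans, some a, (r : Int)))
      = ans + pvMulti (List.replicate r a ++ l) := by
  induction l with
  | nil =>
      intro a r ans hr _ _
      rw [List.foldl_nil]
      rw [pvMulti_rep_append a r hr [] (by simp)]
      have hm0 : pvMulti [] = 0 := rfl
      rw [hm0, pvFinish]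
      split_ifs <;> omega
  | cons b t ih =>
      intro a r ans hr hp ha
      have hab : a ≤ b := ha b (by simp)
      rw [List.foldl_cons]
      by_cases heq : a = b
      · subst heq
        rw [show pvBStep (ans, some a, (r : Int)) a = (ans, some a, (r : Int) + 1) from by
          simp [pvBStep]]
        have hstep := ih a (r + 1) ans (by omega) hp.of_cons
          (fun x hx => ha x (List.mem_cons_of_mem _ hx))
        push_cast at hstep
        rw [hstep]
        have hl : List.replicate (r + 1) a ++ t = List.replicate r a ++ a :: t := by
          rw [List.replicate_succ', List.append_assoc]; rfl
        rw [hl]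
      · rw [show pvBStep (ans, some a, (r : Int)) b
            = ((if 1 < (r : Int) then ans + 1 else ans), some b, 1) from by
          simp [pvBStep, heq]]
        have hbt : ∀ x ∈ t, b ≤ x := fun x hx => (List.pairwise_cons.mp hp).1 x hx
        have hstep := ih b 1 (if 1 < (r : Int) then ans + 1 else ans) le_rfl hp.of_cons hbt
        push_cast at hstep
        rw [hstep]
        have hanotin : a ∉ b :: t := by
          intro hmem
          have hba : b ≤ a := by
            rcases List.mem_cons.mp hmem with rfl | hmem'
            · exact le_rfl
            · exact hbt a hmem'
          exact heq (le_antisymm hab hba)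
        rw [pvMulti_rep_append a r hr (b :: t) hanotin]
        simp only [List.singleton_append]
        split_ifs <;> omega

lemma pvB_eq (words : List String) (k : Int) : prefixConnected_alt words k = pvMulti (pvPs words k) := by
  have halt : prefixConnected_alt words k
      = pvFinish ((PySem.List.sorted (pvPs words k) (fun x => x) false).foldl pvBStep (0, none, 0)) := rfl
  rcases hs : PySem.List.sorted (pvPs words k) (fun x => x) false with _ | ⟨b, t⟩
  · have hnil : pvPs words k = [] := by
      rw [← PySem.List.sorted_eq_nil_iff (key := fun x => x) (rev := false)]; exact hs
    rw [halt, hs, hnil]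
    rfl
  · rw [halt, hs, List.foldl_cons]
    rw [show pvBStep (0, none, 0) b = (0, some b, 1) from by simp [pvBStep]]
    have hpw : (b :: t).Pairwise (fun x y : String => x ≤ y) := by
      have h := PySem.List.sorted_pairwise (pvPs words k) (fun x => x)
      rw [hs] at h
      exact h
    have hrun := pvB_run t b 1 0 le_rfl hpw.of_cons (fun x hx => (List.pairwise_cons.mp hpw).1 x hx)
    push_cast at hrun
    rw [hrun]
    simp only [List.singleton_append]
    rw [zero_add]
    rw [show (b :: t) = PySem.List.sorted (pvPs words k) (fun x => x) false from hs.symm]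
    exact pvMulti_perm (PySem.List.sorted_perm (pvPs words k) (fun x => x) false)

-- ===== VERDICT (by name: the statement is the Claim_ definition above) =====
theorem prefixConnected_spec : Claim_equal_prefixConnected := by
  intro words k _
  show prefixConnected words k = prefixConnected_alt words k
  rw [pvA_eq, pvB_eq]
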